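-- pv_equiv track=rewrite | github.com/MaxZhuravlev/physics-cosmo-bridge | src/rule_space_search.py | _match_single
-- ===== SOURCE A (Python) =====
-- from typing import Dict, List, Optional, Tuple
--
-- Hyperedge = Tuple[int, ...]
--
-- def _match_single(
--     edges: List[Hyperedge], pat: Hyperedge
-- ) -> List[Dict[int, int]]:
--     """Find matchings of a single pattern edge against graph edges."""
--     matches = []
--     for edge in edges:
--         if len(edge) != len(pat):
--             continue
--         # Direct matching (pattern vars -> graph vertices)
--         m = {}
--         ok = True
--         for pv, gv in zip(pat, edge):
--             if pv in m:
--                 if m[pv] != gv: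
--                     ok = False
--                     break
--             else:
--                 m[pv] = gv
--         if ok:
--             matches.append(m)
--     return matches
-- ===== SOURCE B (Python) =====
-- def _match_single(edges, pat):
--     """Find matchings of a single pattern edge against graph edges.
--
--     B: build the whole candidate mapping at once with dict(zip(...)),
--     then validate it in a separate pass by reconstructing the edge."""
--     matches = []
--     for edge in edges:
--         if len(edge) != len(pat):
--             continue
--         m = dict(zip(pat, edge))
--         if tuple(m[pv] for pv in pat) == edge:
--             matches.append(m)
--     return matches
-- ===== Notes on version B (the rewrite author's own statement) =====
-- stated objective: simpler
-- what changed: A checks consistency incrementally per position with an early break while inserting first occurrences; B builds the whole candidate mapping at once with dict(zip(pat, edge)) and validates it in a separate pass by reconstructing the edge from the mapping.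
import Mathlib
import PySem

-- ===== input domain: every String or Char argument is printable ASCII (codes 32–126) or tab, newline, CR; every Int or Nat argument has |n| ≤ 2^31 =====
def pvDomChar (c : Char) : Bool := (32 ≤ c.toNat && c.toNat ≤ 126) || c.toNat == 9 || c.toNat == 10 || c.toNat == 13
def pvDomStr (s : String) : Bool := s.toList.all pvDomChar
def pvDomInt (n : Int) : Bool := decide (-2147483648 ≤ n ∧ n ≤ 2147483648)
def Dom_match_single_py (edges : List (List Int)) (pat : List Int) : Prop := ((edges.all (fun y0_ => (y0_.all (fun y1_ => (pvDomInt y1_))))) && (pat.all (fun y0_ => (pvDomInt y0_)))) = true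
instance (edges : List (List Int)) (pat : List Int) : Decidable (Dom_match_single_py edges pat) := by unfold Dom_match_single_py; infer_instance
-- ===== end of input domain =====

-- B builds the candidate dict at once from zip(pat, edge) and validates by reconstructing
-- the edge, instead of A's incremental per-position consistency check; objective: simpler.


-- ===== PORT A =====
-- A's inner loop: 'for pv, gv in zip(pat, edge): …' with early break; none = 'ok = False'.
def matchSingleA_loop (ps : List (Int × Int)) (m : PySem.Dict Int Int) :
    Option (PySem.Dict Int Int) :=
  match ps with
  | [] => some m
  | (pv, gv) :: rest =>
    match m.get? pv with
    | some v => if v ≠ gv then none else matchSingleA_loop rest m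
    | none => matchSingleA_loop rest (m.insert pv gv)

def match_single_py (edges : List (List Int)) (pat : List Int) : List (List (Int × Int)) :=
  edges.foldl (fun acc edge =>
    if edge.length ≠ pat.length then acc
    else
      match matchSingleA_loop (pat.zip edge) PySem.Dict.empty with
      | some m => acc ++ [m.items]
      | none => acc) []

-- ===== PORT B =====
-- 'm = dict(zip(pat, edge))'
def matchSingleB_dict (ps : List (Int × Int)) : PySem.Dict Int Int :=
  ps.foldl (fun m p => m.insert p.1 p.2) PySem.Dict.empty

def match_single_py_alt (edges : List (List Int)) (pat : List Int) : List (List (Int × Int)) :=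
  edges.foldl (fun acc edge =>
    if edge.length ≠ pat.length then acc
    else
      let m := matchSingleB_dict (pat.zip edge)
      -- 'tuple(m[pv] for pv in pat) == edge'; getD is exact here: every pv of pat is a key
      -- of m because len(edge) == len(pat), so Python's m[pv] never raises.
      if pat.map (fun pv => m.getD pv 0) = edge then acc ++ [m.items]
      else acc) []

-- ===== PRECONDITION & SPEC =====
def Spec_match_single_py (edges : List (List Int)) (pat : List Int) (out : List (List (Int × Int))) : Prop := out = match_single_py_alt edges pat
instance (edges : List (List Int)) (pat : List Int) (out : List (List (Int × Int))) : Decidable (Spec_match_single_py edges pat out) := by unfold Spec_match_single_py; infer_instance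

-- ===== CLAIM (what is proved, stated in full; the proofs are below) =====
def Claim_equal_match_single_py : Prop := ∀ (edges : List (List Int)) (pat : List Int), Dom_match_single_py edges pat → Spec_match_single_py edges pat (match_single_py edges pat)

-- ===== LEMMAS AND PROOFS =====

def pvConsistent (ps : List (Int × Int)) : Prop :=
  ∀ p ∈ ps, ∀ q ∈ ps, p.1 = q.1 → p.2 = q.2

def pvCompat (ps : List (Int × Int)) (m : PySem.Dict Int Int) : Prop :=
  ∀ p ∈ ps, ∀ v, m.get? p.1 = some v → p.2 = v

lemma insert_self_of_get? (m : PySem.Dict Int Int) (k v : Int) (hnd : m.keys.Nodup)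
    (h : m.get? k = some v) : m.insert k v = m := by
  apply PySem.Dict.ext
  have hc : m.contains k = true := by
    rw [PySem.Dict.contains_eq_isSome_get?, h]; rfl
  rw [PySem.Dict.items_insert_of_contains _ v hc]
  conv_rhs => rw [← List.map_id m.items]
  apply List.map_congr_left
  intro p hp
  by_cases hk : p.1 = k
  · have h2 : m.get? p.1 = some p.2 := PySem.Dict.get?_of_mem_items m (by simpa using hp) hnd
    rw [hk, h] at h2
    have : p.2 = v := by injection h2.symm
    simp [hk]
    exact (Prod.ext hk this).symm
  · simp [hk]

lemma loop_some (ps : List (Int × Int)) (m : PySem.Dict Int Int) (hnd : m.keys.Nodup)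
    (hc : pvConsistent ps) (hcm : pvCompat ps m) :
    matchSingleA_loop ps m = some (ps.foldl (fun m p => m.insert p.1 p.2) m) := by
  induction ps generalizing m with
  | nil => rfl
  | cons p rest ih =>
    obtain ⟨pv, gv⟩ := p
    have hcr : pvConsistent rest := fun a ha b hb => hc a (.tail _ ha) b (.tail _ hb)
    rw [List.foldl_cons]
    cases hget : m.get? pv with
    | some v =>
      have hgv : gv = v := hcm (pv, gv) (.head _) v hget
      simp only [matchSingleA_loop, hget]
      rw [if_neg (by omega)]
      have heq : m.insert pv gv = m := by
        rw [hgv]; exact insert_self_of_get? m pv v hnd hget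
      rw [heq]
      exact ih m hnd hcr (fun a ha v hv => hcm a (.tail _ ha) v hv)
    | none =>
      simp only [matchSingleA_loop, hget]
      apply ih _ (PySem.Dict.nodup_keys_insert m pv gv hnd) hcr
      intro q hq v hv
      rw [PySem.Dict.get?_insert] at hv
      by_cases hk : q.1 = pv
      · rw [if_pos hk] at hv
        have : gv = v := by injection hv
        rw [← this]
        exact hc q (.tail _ hq) (pv, gv) (.head _) hk
      · rw [if_neg hk] at hv
        exact hcm q (.tail _ hq) v hv

lemma loop_none (ps : List (Int × Int)) (m : PySem.Dict Int Int)
    (h : ¬ (pvConsistent ps ∧ pvCompat ps m)) :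
    matchSingleA_loop ps m = none := by
  induction ps generalizing m with
  | nil =>
    exact absurd ⟨fun a ha => absurd ha (List.not_mem_nil), fun a ha => absurd ha (List.not_mem_nil)⟩ h
  | cons p rest ih =>
    obtain ⟨pv, gv⟩ := p
    cases hget : m.get? pv with
    | some v =>
      simp only [matchSingleA_loop, hget]
      by_cases hv : v ≠ gv
      · rw [if_pos hv]
      · rw [if_neg hv]
        rw [not_ne_iff] at hv
        apply ih
        rintro ⟨hcr, hcmr⟩
        apply h
        constructor
        · rintro a ha b hb hab
          rw [List.mem_cons] at ha hb
          rcases ha with rfl | ha <;> rcases hb with rfl | hb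
          · rfl
          · exact ((hcmr b hb v (by rw [← hab]; exact hget)).trans hv).symm
          · exact (hcmr a ha v (by rw [hab]; exact hget)).trans hv
          · exact hcr a ha b hb hab
        · rintro a ha w hw
          rw [List.mem_cons] at ha
          rcases ha with rfl | ha
          · rw [hget] at hw; injection hw with hw'; omega
          · exact hcmr a ha w hw
    | none =>
      simp only [matchSingleA_loop, hget]
      apply ih
      rintro ⟨hcr, hcmr⟩
      apply h
      constructor
      · rintro a ha b hb hab
        rw [List.mem_cons] at ha hb
        rcases ha with rfl | ha <;> rcases hb with rfl | hb
        · rfl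
        · exact (hcmr b hb gv (by rw [PySem.Dict.get?_insert, if_pos hab.symm])).symm
        · exact hcmr a ha gv (by rw [PySem.Dict.get?_insert, if_pos hab])
        · exact hcr a ha b hb hab
      · rintro a ha w hw
        rw [List.mem_cons] at ha
        rcases ha with rfl | ha
        · rw [hget] at hw; exact absurd hw (by simp)
        · by_cases hk : a.1 = pv
          · rw [hk, hget] at hw; exact absurd hw (by simp)
          · exact hcmr a ha w (by rw [PySem.Dict.get?_insert, if_neg hk]; exact hw)

lemma get?_foldl_insert (ps : List (Int × Int)) (m : PySem.Dict Int Int) (k : Int) :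
    (ps.foldl (fun m p => m.insert p.1 p.2) m).get? k =
      ((ps.reverse.find? (fun p => p.1 == k)).map (·.2)).or (m.get? k) := by
  induction ps generalizing m with
  | nil => simp
  | cons p rest ih =>
    rw [List.foldl_cons, ih, List.reverse_cons, List.find?_append]
    cases hf : rest.reverse.find? (fun p => p.1 == k) with
    | some q => simp
    | none =>
      simp only [Option.none_or, Option.map_none]
      rw [PySem.Dict.get?_insert]
      by_cases hk : k = p.1
      · simp [hk]
      · simp [if_neg hk, List.find?, show (p.1 == k) = false by simpa using (Ne.symm hk)]

lemma check_iff_consistent (ps : List (Int × Int)) :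
    (ps.map (fun p => (matchSingleB_dict ps).getD p.1 0) = ps.map (·.2)) ↔ pvConsistent ps := by
  rw [List.map_eq_map_iff]
  have hget : ∀ p ∈ ps, ∃ q ∈ ps, q.1 = p.1 ∧
      (matchSingleB_dict ps).get? p.1 = some q.2 := by
    intro p hp
    have hs : (ps.reverse.find? (fun r => r.1 == p.1)).isSome := by
      rw [List.find?_isSome]
      exact ⟨p, by simpa using hp, by simp⟩
    obtain ⟨q, hq⟩ := Option.isSome_iff_exists.mp hs
    refine ⟨q, by simpa using List.mem_of_find?_eq_some hq, by simpa using List.find?_some hq, ?_⟩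
    rw [matchSingleB_dict, get?_foldl_insert, hq]
    rfl
  constructor
  · intro hchk a ha b hb hab
    obtain ⟨q, hq, hq1, hq2⟩ := hget a ha
    have ha' := hchk a ha
    have hb' := hchk b hb
    rw [PySem.Dict.getD_eq_get?_getD, hq2] at ha'
    rw [PySem.Dict.getD_eq_get?_getD, ← hab, hq2] at hb'
    simp at ha' hb'
    omega
  · intro hc p hp
    obtain ⟨q, hq, hq1, hq2⟩ := hget p hp
    rw [PySem.Dict.getD_eq_get?_getD, hq2]
    simpa using (hc q hq p hp hq1)

lemma step_eq (pat edge : List Int) (acc : List (List (Int × Int))) :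
    (if edge.length ≠ pat.length then acc
     else match matchSingleA_loop (pat.zip edge) PySem.Dict.empty with
          | some m => acc ++ [m.items]
          | none => acc)
    = (if edge.length ≠ pat.length then acc
       else
         let m := matchSingleB_dict (pat.zip edge)
         if pat.map (fun pv => m.getD pv 0) = edge then acc ++ [m.items] else acc) := by
  by_cases hl : edge.length ≠ pat.length
  · rw [if_pos hl, if_pos hl]
  · rw [if_neg hl, if_neg hl]
    rw [not_ne_iff] at hl
    show _ = (if pat.map (fun pv => (matchSingleB_dict (pat.zip edge)).getD pv 0) = edge
              then acc ++ [(matchSingleB_dict (pat.zip edge)).items] else acc)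
    set ps := pat.zip edge with hps
    have hfst : ps.map Prod.fst = pat := List.map_fst_zip (by omega)
    have hsnd : ps.map Prod.snd = edge := List.map_snd_zip (by omega)
    have hmap : (pat.map (fun pv => (matchSingleB_dict ps).getD pv 0) = edge)
        ↔ (ps.map (fun p => (matchSingleB_dict ps).getD p.1 0) = ps.map (·.2)) := by
      conv_lhs => rw [← hfst, ← hsnd, List.map_map]
      rfl
    by_cases hcons : pvConsistent ps
    · rw [loop_some _ _ PySem.Dict.nodup_keys_empty hcons
        (by intro a _ v hv; rw [PySem.Dict.get?_empty] at hv; exact absurd hv (by simp))]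
      rw [if_pos (hmap.mpr ((check_iff_consistent _).mpr hcons))]
      rfl
    · rw [loop_none _ _ (by rintro ⟨h1, _⟩; exact hcons h1)]
      rw [if_neg (fun hch => hcons ((check_iff_consistent _).mp (hmap.mp hch)))]

lemma fold_eq (pat : List Int) (edges : List (List Int)) :
    ∀ acc : List (List (Int × Int)),
    edges.foldl (fun acc edge =>
      if edge.length ≠ pat.length then acc
      else
        match matchSingleA_loop (pat.zip edge) PySem.Dict.empty with
        | some m => acc ++ [m.items]
        | none => acc) acc
    = edges.foldl (fun acc edge =>
      if edge.length ≠ pat.length then acc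
      else
        let m := matchSingleB_dict (pat.zip edge)
        if pat.map (fun pv => m.getD pv 0) = edge then acc ++ [m.items]
        else acc) acc := by
  induction edges with
  | nil => intro acc; rfl
  | cons e rest ih =>
    intro acc
    rw [List.foldl_cons, List.foldl_cons, step_eq]
    exact ih _


-- ===== VERDICT (by name: the statement is the Claim_ definition above) =====
theorem match_single_py_spec : Claim_equal_match_single_py := by
  intro edges pat _
  show match_single_py edges pat = match_single_py_alt edges pat
  rw [match_single_py, match_single_py_alt]
  exact fold_eq pat edges []
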